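-- pv_equiv track=rewrite | github.com/AlbertoV5/Waveform | Detect Note Onset/ParsonsCode.py | GetPC
-- ===== SOURCE A (Python) =====
-- def GetPC(t):
--     last = 0
--     pc = []
--     for i in t:
--         if last == 0:
--             last = i
--             pc.append("*")
--         else:
--             if i > last:
--                 pc.append("u")
--             elif i < last:
--                 pc.append("d")
--             elif i == last:
--                 pc.append("r")
--     return pc
-- ===== SOURCE B (Python) =====
-- def GetPC(t):
--     t = list(t)
--     if not t:
--         return []
--     ref = t[0]
--     if ref == 0:
--         return ["*"] + GetPC(t[1:])
--     return ["*"] + [("u" if v > ref else "d" if v < ref else "r") for v in t[1:]]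
-- ===== Notes on version B (the rewrite author's own statement) =====
-- stated objective: simpler
-- what changed: Replaces A's single stateful loop over a mutable 'last' sentinel by structural recursion on the list: each leading zero emits '*' and recurses, and the first nonzero head becomes the reference for one stateless comparison comprehension over the tail.
import Mathlib
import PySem

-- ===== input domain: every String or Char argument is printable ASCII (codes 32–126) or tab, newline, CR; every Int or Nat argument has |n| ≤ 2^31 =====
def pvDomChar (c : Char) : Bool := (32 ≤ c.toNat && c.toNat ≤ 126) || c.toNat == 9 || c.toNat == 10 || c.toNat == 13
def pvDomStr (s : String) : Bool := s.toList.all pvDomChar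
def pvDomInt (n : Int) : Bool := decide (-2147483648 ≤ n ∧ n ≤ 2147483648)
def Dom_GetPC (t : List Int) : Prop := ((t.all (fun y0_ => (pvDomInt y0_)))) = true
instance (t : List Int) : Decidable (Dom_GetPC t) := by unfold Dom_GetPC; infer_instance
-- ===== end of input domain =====

-- B replaces A's stateful loop (mutable 'last' sentinel) by structural recursion:
-- leading zeros emit '*' and recurse; the first nonzero head drives one stateless
-- comparison comprehension over the tail (same values, no speed claim).

-- ===== PORT A =====
-- loop state: (last, pc); branches in A's order, including the final 'elif i == last'
def pvStepA (s : Int × List String) (i : Int) : Int × List String :=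
  if s.1 == 0 then (i, s.2 ++ ["*"])
  else if i > s.1 then (s.1, s.2 ++ ["u"])
  else if i < s.1 then (s.1, s.2 ++ ["d"])
  else if i == s.1 then (s.1, s.2 ++ ["r"])
  else (s.1, s.2)

def GetPC (t : List Int) : List String :=
  (t.foldl pvStepA (0, [])).2

-- ===== PORT B =====
-- Source B's recursion: empty → []; zero head → "*" :: recurse; nonzero head ref →
-- "*" :: comparison comprehension over the tail
def GetPC_alt : List Int → List String
  | [] => []
  | v :: rest =>
      if v == 0 then "*" :: GetPC_alt rest
      else "*" :: rest.map (fun w => if w > v then "u" else if w < v then "d" else "r")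

-- ===== PRECONDITION & SPEC =====
def Spec_GetPC (t : List Int) (out : List String) : Prop := out = GetPC_alt t
instance (t : List Int) (out : List String) : Decidable (Spec_GetPC t out) := by unfold Spec_GetPC; infer_instance

-- ===== CLAIM (what is proved, stated in full; the proofs are below) =====
def Claim_equal_GetPC : Prop := ∀ (t : List Int), Dom_GetPC t → Spec_GetPC t (GetPC t)

-- ===== LEMMAS AND PROOFS =====

-- one step commutes with prefixing the accumulator
theorem pvStepA_acc (last : Int) (acc : List String) (i : Int) :
    pvStepA (last, acc) i = ((pvStepA (last, []) i).1, acc ++ (pvStepA (last, []) i).2) := by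
  simp only [pvStepA]
  split_ifs <;> simp

-- the accumulator only prefixes the fold's output
theorem pvFoldA_acc (l : List Int) (last : Int) (acc : List String) :
    l.foldl pvStepA (last, acc) =
      ((l.foldl pvStepA (last, [])).1, acc ++ (l.foldl pvStepA (last, [])).2) := by
  induction l generalizing last acc with
  | nil => simp
  | cons v rest ih =>
      rw [List.foldl_cons, List.foldl_cons, pvStepA_acc, ih]
      conv_rhs => rw [← Prod.mk.eta (p := pvStepA (last, []) v), ih]
      simp

-- once last = ref ≠ 0, A's loop is a comparison map
theorem pvFoldA_ref (l : List Int) (ref : Int) (href : ref ≠ 0) (acc : List String) :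
    l.foldl pvStepA (ref, acc) =
      (ref, acc ++ l.map (fun v => if v > ref then "u" else if v < ref then "d" else "r")) := by
  induction l generalizing acc with
  | nil => simp
  | cons v rest ih =>
      have h0 : (ref == 0) = false := by simpa using href
      simp only [List.foldl_cons, pvStepA, h0]
      by_cases h1 : v > ref
      · simp [h1, ih]
      · by_cases h2 : v < ref
        · simp [h1, h2, ih]
        · have h3 : v = ref := by omega
          simp [h3, ih]

theorem pvGetPC_eq (t : List Int) : GetPC t = GetPC_alt t := by
  induction t with
  | nil => rfl
  | cons v rest ih =>
      by_cases hv : v = 0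
      · subst hv
        have hA : GetPC (0 :: rest) = "*" :: GetPC rest := by
          simp only [GetPC, List.foldl_cons, pvStepA]
          rw [pvFoldA_acc]
          simp
        rw [hA, ih]
        simp [GetPC_alt]
      · have hA : GetPC (v :: rest) =
            "*" :: rest.map (fun w => if w > v then "u" else if w < v then "d" else "r") := by
          have h1 : pvStepA (0, []) v = (v, ["*"]) := by simp [pvStepA]
          simp only [GetPC, List.foldl_cons, h1]
          rw [pvFoldA_ref _ _ hv]
          simp
        rw [hA]
        simp [GetPC_alt, hv]

-- ===== VERDICT (by name: the statement is the Claim_ definition above) =====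
theorem GetPC_spec : Claim_equal_GetPC := by
  intro t _
  unfold Spec_GetPC
  exact pvGetPC_eq t
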